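-- pv_equiv track=rewrite | github.com/xamie01/Transplier-program | src/generators/pine.py | _params_to_pine
-- ===== SOURCE A (Python) =====
-- from typing import Dict, List, Any
--
-- def _params_to_pine(params: Dict[str, Any]) -> str:
--     """Convert IR params dict to Pine function call arguments."""
--     if not params:
--         return ''
--
--     parts = []
--     # Order: period, fast, slow, signal (common indicators)
--     order = ['period', 'fast', 'slow', 'signal']
--     for key in order:
--         if key in params:
--             parts.append(str(params[key]))
--
--     # Remaining params
--     for key in sorted(params.keys()):
--         if key not in order:
--             parts.append(str(params[key]))
--
--     return ', '.join(parts)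
-- ===== SOURCE B (Python) =====
-- def _params_to_pine(params):
--     """Convert IR params dict to Pine function call arguments."""
--     if not params:
--         return ''
--     order = ['period', 'fast', 'slow', 'signal']
--
--     def rank(k):
--         return (order.index(k), '') if k in order else (len(order), k)
--
--     return ', '.join(str(params[k]) for k in sorted(params, key=rank))
-- ===== Notes on version B (the rewrite author's own statement) =====
-- stated objective: idiomatic
-- what changed: Replaces A's two accumulation loops (a fixed-order membership pass over ['period','fast','slow','signal'] followed by a sorted pass over the remaining keys) with a single comparator-driven sort: a rank key maps each special key to (its index, '') and every other key to (len(order), key), so one sorted() plus one join produces the identical ordering.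
import Mathlib
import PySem

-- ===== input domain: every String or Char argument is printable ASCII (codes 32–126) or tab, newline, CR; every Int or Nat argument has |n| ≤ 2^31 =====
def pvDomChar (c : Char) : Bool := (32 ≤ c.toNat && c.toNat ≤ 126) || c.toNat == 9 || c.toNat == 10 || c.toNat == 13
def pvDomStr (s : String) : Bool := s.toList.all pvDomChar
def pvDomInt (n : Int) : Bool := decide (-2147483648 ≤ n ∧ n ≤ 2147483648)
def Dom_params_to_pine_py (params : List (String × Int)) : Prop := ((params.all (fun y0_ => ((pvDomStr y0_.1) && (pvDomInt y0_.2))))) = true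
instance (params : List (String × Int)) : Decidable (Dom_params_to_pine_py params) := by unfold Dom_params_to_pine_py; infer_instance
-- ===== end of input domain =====

-- B replaces A's two accumulation loops (fixed-order pass, then sorted-remainder pass) by one
-- comparator-driven sort with a rank key; byte-identical output, same cost (objective: idiomatic).


-- ===== PORT A =====
-- the literal `order` list of the Python source (shared by both ports as plain data)
def pineOrder : List String := ["period", "fast", "slow", "signal"]

-- The Python parameter is a dict; the association-list argument is turned into the dict it
-- denotes with PySem.Dict.ofList (exact: dict construction is last-wins, first-position).
def params_to_pine_py (params : List (String × Int)) : String :=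
  if params = [] then "" else
    let d := PySem.Dict.ofList params
    let parts : List String :=
      pineOrder.foldl (fun parts key =>
        if d.contains key then parts ++ [PySem.Int.toStr (d.getD key 0)] else parts) []
    let parts :=
      (PySem.List.sorted d.keys (fun k => k) false).foldl (fun parts key =>
        if key ∈ pineOrder then parts else parts ++ [PySem.Int.toStr (d.getD key 0)]) parts
    PySem.Str.join ", " parts

-- ===== PORT B =====
-- Source B's rank(k): Python's tuple comparison is lexicographic, hence the key type Int ×ₗ String
def pineRank (k : String) : Int ×ₗ String :=
  if k ∈ pineOrder then toLex ((((PySem.List.index? pineOrder k).getD 0 : Nat) : Int), "")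
  else toLex ((pineOrder.length : Int), k)

def params_to_pine_py_alt (params : List (String × Int)) : String :=
  if params = [] then "" else
    let d := PySem.Dict.ofList params
    PySem.Str.join ", "
      ((PySem.List.sorted d.keys pineRank false).map (fun k => PySem.Int.toStr (d.getD k 0)))

-- ===== PRECONDITION & SPEC =====
def Spec_params_to_pine_py (params : List (String × Int)) (out : String) : Prop := out = params_to_pine_py_alt params
instance (params : List (String × Int)) (out : String) : Decidable (Spec_params_to_pine_py params out) := by unfold Spec_params_to_pine_py; infer_instance

-- ===== CLAIM (what is proved, stated in full; the proofs are below) =====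
def Claim_equal_params_to_pine_py : Prop := ∀ (params : List (String × Int)), Dom_params_to_pine_py params → Spec_params_to_pine_py params (params_to_pine_py params)

-- ===== LEMMAS AND PROOFS =====

theorem toLex_lt_left {i j : Int} {s t : String} (hij : i < j) :
    (toLex (i, s) : Int ×ₗ String) < toLex (j, t) := by
  rw [Prod.Lex.lt_iff]; left; exact hij

theorem toLex_lt_right {s t : String} (hst : s < t) :
    (toLex ((4 : Int), s) : Int ×ₗ String) < toLex (4, t) := by
  rw [Prod.Lex.lt_iff]; right; exact ⟨rfl, hst⟩

theorem pineRank_of_not_mem {k : String} (h : ¬ k ∈ pineOrder) : pineRank k = toLex (4, k) := by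
  simp [pineRank, h]; rfl

theorem pineOrder_pairwise : List.Pairwise (fun a b => pineRank a < pineRank b) pineOrder := by
  decide

-- the single sorted-by-rank key sequence of B equals the two key passes of A
theorem pine_key_split (ks : List String) (h : ks.Nodup) :
    PySem.List.sorted ks pineRank false =
      pineOrder.filter (fun k => decide (k ∈ ks)) ++
        (PySem.List.sorted ks (fun k => k) false).filter (fun k => !decide (k ∈ pineOrder)) := by
  apply PySem.List.sorted_eq_of_perm_of_pairwise_lt
  · have h1 : (pineOrder.filter (fun k => decide (k ∈ ks))).Perm
        (ks.filter (fun k => decide (k ∈ pineOrder))) := by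
      rw [List.perm_ext_iff_of_nodup (List.Nodup.filter _ (by decide)) (List.Nodup.filter _ h)]
      intro a; simp [List.mem_filter, and_comm]
    have h2 : ((PySem.List.sorted ks (fun k => k) false).filter
        (fun k => !decide (k ∈ pineOrder))).Perm (ks.filter (fun k => !decide (k ∈ pineOrder))) :=
      List.Perm.filter _ (PySem.List.sorted_perm ks _ false)
    exact (h1.append h2).trans (List.filter_append_perm _ ks)
  · rw [List.pairwise_append]
    refine ⟨List.pairwise_filter.2 (pineOrder_pairwise.imp fun hab => fun _ _ => hab), ?_, ?_⟩
    · refine List.pairwise_filter.2 ?_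
      have hs1 := PySem.List.sorted_pairwise ks (fun k => k)
      have hs2 : (PySem.List.sorted ks (fun k => k) false).Nodup :=
        ((PySem.List.sorted_perm ks _ false).nodup_iff).2 h
      refine (hs1.and hs2).imp ?_
      rintro a b ⟨hle, hne⟩ ha hb
      have ha' : ¬ a ∈ pineOrder := by simpa using ha
      have hb' : ¬ b ∈ pineOrder := by simpa using hb
      rw [pineRank_of_not_mem ha', pineRank_of_not_mem hb']
      exact toLex_lt_right (lt_of_le_of_ne hle hne)
    · intro a ha b hb
      have ha' : a ∈ pineOrder := (List.mem_filter.1 ha).1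
      have hb' : ¬ b ∈ pineOrder := by have := (List.mem_filter.1 hb).2; simpa using this
      rw [pineRank_of_not_mem hb']
      simp only [pineOrder, List.mem_cons, List.not_mem_nil, or_false] at ha'
      rcases ha' with rfl | rfl | rfl | rfl
      · rw [show pineRank "period" = toLex ((0 : Int), "") from rfl]
        exact toLex_lt_left (by norm_num)
      · rw [show pineRank "fast" = toLex ((1 : Int), "") from rfl]
        exact toLex_lt_left (by norm_num)
      · rw [show pineRank "slow" = toLex ((2 : Int), "") from rfl]
        exact toLex_lt_left (by norm_num)
      · rw [show pineRank "signal" = toLex ((3 : Int), "") from rfl]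
        exact toLex_lt_left (by norm_num)

-- ===== VERDICT (by name: the statement is the Claim_ definition above) =====
theorem params_to_pine_py_spec : Claim_equal_params_to_pine_py := by
  intro params _
  unfold Spec_params_to_pine_py params_to_pine_py params_to_pine_py_alt
  by_cases hp : params = []
  · simp [hp]
  · simp only [if_neg hp]
    set d := PySem.Dict.ofList params with hd
    have hfun : (fun (parts : List String) key =>
        if key ∈ pineOrder then parts else parts ++ [PySem.Int.toStr (d.getD key 0)]) =
        (fun parts key => if (!decide (key ∈ pineOrder)) = true then
          parts ++ [PySem.Int.toStr (d.getD key 0)] else parts) := by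
      funext parts key; by_cases h : key ∈ pineOrder <;> simp [h]
    rw [hfun, PySem.List.foldl_append_if, PySem.List.foldl_append_if, List.nil_append,
      ← List.map_append, pine_key_split d.keys (PySem.Dict.nodup_keys_ofList params)]
    have hc : d.contains = fun k => decide (k ∈ d.keys) :=
      funext fun k => PySem.Dict.contains_eq_decide_mem_keys d k
    rw [hc]
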